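-- pv_equiv track=rewrite | github.com/jjh0987/MyProject | pythonProject/codility/lesson5.py | solution
-- ===== SOURCE A (Python) =====
-- def solution(A):
--     A = [str(i) for i in A]
--     tar = ''.join(A).lstrip('1').rstrip('0').split('0')
--
--     ans = 0
--     for i in range(len(tar)):
--         ans += i * len(tar[i])
--
--     if ans > 1000000000:
--         return -1
--     else:
--         return ans
-- ===== SOURCE B (Python) =====
-- def solution(A):
--     s = ''.join(str(i) for i in A).lstrip('1').rstrip('0')
--     zeros = 0
--     ans = 0
--     for c in s:
--         if c == '0':
--             zeros += 1
--         else: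
--             ans += zeros
--     if ans > 1000000000:
--         return -1
--     else:
--         return ans
-- ===== Notes on version B (the rewrite author's own statement) =====
-- stated objective: simpler
-- what changed: Replaces split-into-groups plus an indexed sum of i*len(group) by a single character pass over the same preprocessed string that keeps a running zero counter and adds it at every non-zero character.
import Mathlib
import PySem

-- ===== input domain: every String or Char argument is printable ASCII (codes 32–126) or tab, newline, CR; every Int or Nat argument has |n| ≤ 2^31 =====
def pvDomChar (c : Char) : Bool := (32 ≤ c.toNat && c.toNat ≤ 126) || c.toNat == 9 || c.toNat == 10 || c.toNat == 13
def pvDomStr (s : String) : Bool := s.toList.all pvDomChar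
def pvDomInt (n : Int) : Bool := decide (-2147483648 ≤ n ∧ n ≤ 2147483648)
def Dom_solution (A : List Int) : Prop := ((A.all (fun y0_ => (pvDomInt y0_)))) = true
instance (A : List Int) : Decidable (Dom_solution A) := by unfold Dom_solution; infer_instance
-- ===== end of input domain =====

-- B keeps A's preprocessing but replaces split('0') plus the indexed sum i*len(group)
-- by one character pass with a running zero counter; objective: simpler.

-- ===== PORT A =====
-- ''.join(str(i) for i in A).lstrip('1').rstrip('0') — shared by both Pythons; lstrip('1') /
-- rstrip('0') for a single strip character are exactly dropWhile of that character from the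
-- left / right (hand port, exact).
def pvPrep (A : List Int) : List Char :=
  (((PySem.Chars.join [] (A.map PySem.Int.toChars)).dropWhile (fun c => c == '1')).reverse.dropWhile
      (fun c => c == '0')).reverse

def solution (A : List Int) : Int :=
  let tar := PySem.Chars.splitOn (pvPrep A) ['0']
  let ans := (PySem.List.pyRange 0 (tar.length : Int) 1).foldl
    (fun ans i => ans + i * ((PySem.List.pyGetD tar i []).length : Int)) 0
  if ans > 1000000000 then -1 else ans

-- ===== PORT B =====
def solution_alt (A : List Int) : Int :=
  let p := (pvPrep A).foldl
    (fun (p : Int × Int) c => if c == '0' then (p.1 + 1, p.2) else (p.1, p.2 + p.1)) (0, 0)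
  if p.2 > 1000000000 then -1 else p.2

-- ===== PRECONDITION & SPEC =====
def Spec_solution (A : List Int) (out : Int) : Prop := out = solution_alt A
instance (A : List Int) (out : Int) : Decidable (Spec_solution A out) := by unfold Spec_solution; infer_instance

-- ===== CLAIM (what is proved, stated in full; the proofs are below) =====
def Claim_equal_solution : Prop := ∀ (A : List Int), Dom_solution A → Spec_solution A (solution A)

-- ===== LEMMAS AND PROOFS =====

-- split1 pref l: splitting l on '0' with a partial first piece pref (front-order)
def split1 (pref : List Char) : List Char → List (List Char)
  | [] => [pref]
  | c :: r => if c = '0' then pref :: split1 [] r else split1 (pref ++ [c]) r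

-- weighted sum Σ (k+i) * |ps_i|
def wsum (k : Int) : List (List Char) → Int
  | [] => 0
  | p :: ps => k * (p.length : Int) + wsum (k + 1) ps

lemma splitOn_go_nil (f : Nat) (cur : List Char) (acc : List (List Char)) :
    PySem.Chars.splitOn.go ['0'] (f + 1) [] cur acc = acc.reverse ++ split1 cur.reverse [] := by
  rw [PySem.Chars.splitOn.go]
  simp [split1]
  omega

lemma splitOn_go_zero (f : Nat) (r cur : List Char) (acc : List (List Char)) :
    PySem.Chars.splitOn.go ['0'] (f + 1) ('0' :: r) cur acc =
      PySem.Chars.splitOn.go ['0'] f r [] (cur.reverse :: acc) := by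
  rw [PySem.Chars.splitOn.go]
  simp [List.isPrefixOf]

lemma splitOn_go_nonzero (f : Nat) (c : Char) (r cur : List Char) (acc : List (List Char))
    (hc : ¬ c = '0') :
    PySem.Chars.splitOn.go ['0'] (f + 1) (c :: r) cur acc =
      PySem.Chars.splitOn.go ['0'] f r (c :: cur) acc := by
  rw [PySem.Chars.splitOn.go]
  simp [List.isPrefixOf, Ne.symm hc]

lemma splitOn_go_eq (l : List Char) : ∀ (fuel : Nat) (cur : List Char) (acc : List (List Char)),
    l.length < fuel →
    PySem.Chars.splitOn.go ['0'] fuel l cur acc = acc.reverse ++ split1 cur.reverse l := by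
  induction l with
  | nil =>
      intro fuel cur acc h
      cases fuel with
      | zero => omega
      | succ f => exact splitOn_go_nil f cur acc
  | cons c r ih =>
      intro fuel cur acc h
      cases fuel with
      | zero => omega
      | succ f =>
        simp only [List.length_cons] at h
        by_cases hc : c = '0'
        · subst hc
          rw [splitOn_go_zero f r cur acc, ih f [] (cur.reverse :: acc) (by omega)]
          simp [split1]
        · rw [splitOn_go_nonzero f c r cur acc hc, ih f (c :: cur) acc (by omega)]
          simp [split1, hc]

lemma splitOn_eq_split1 (l : List Char) :
    PySem.Chars.splitOn l ['0'] = split1 [] l := by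
  rw [PySem.Chars.splitOn, splitOn_go_eq l (l.length + 1) [] [] (by omega)]
  rfl

-- A's indexed loop over range(len(ps)) computes wsum
lemma foldl_range_wsum (ps : List (List Char)) : ∀ (k : Nat) (a : Int),
    (List.range ps.length).foldl
      (fun ans i => ans + ((k + i : Nat) : Int) * ((ps.getD i []).length : Int)) a
      = a + wsum (k : Int) ps := by
  induction ps with
  | nil => intro k a; simp [wsum]
  | cons p ps ih =>
      intro k a
      rw [List.length_cons, List.range_succ_eq_map]
      simp only [List.foldl_cons, List.foldl_map, List.getD_cons_zero, List.getD_cons_succ]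
      have hf : (fun (x : Int) (y : Nat) =>
            x + ((k + y.succ : Nat) : Int) * ((ps.getD y []).length : Int))
          = (fun (x : Int) (y : Nat) =>
            x + (((k + 1) + y : Nat) : Int) * ((ps.getD y []).length : Int)) := by
        funext x y; congr 3; omega
      rw [hf, show (k + 0 : Nat) = k from rfl, ih (k + 1)]
      simp only [wsum]
      push_cast
      ring

-- B's fold invariant: second component accumulates the weighted sum over the split pieces
lemma wsum_split1_pref (m : List Char) : ∀ (pref : List Char) (k : Int),
    wsum k (split1 pref m) = k * (pref.length : Int) + wsum k (split1 [] m) := by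
  induction m with
  | nil => intro pref k; simp [split1, wsum]
  | cons d s ihm =>
      intro pref k
      by_cases hd : d = '0'
      · subst hd; simp [split1, wsum]
      · simp only [split1, if_neg hd]
        rw [ihm (pref ++ [d]) k]
        simp only [List.nil_append]
        rw [ihm [d] k]
        push_cast [List.length_append]
        ring

lemma foldl_counter (l : List Char) : ∀ (z a : Int),
    l.foldl (fun (p : Int × Int) c => if c == '0' then (p.1 + 1, p.2) else (p.1, p.2 + p.1)) (z, a)
      = (z + ((l.count '0' : Nat) : Int), a + wsum z (split1 [] l)) := by
  induction l with
  | nil => intro z a; simp [split1, wsum]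
  | cons c r ih =>
      intro z a
      by_cases hc : c = '0'
      · subst hc
        simp only [List.foldl_cons, beq_self_eq_true, if_pos, List.count_cons_self]
        rw [ih (z + 1) a]
        simp only [split1, Prod.mk.injEq]
        refine ⟨by push_cast; ring, by simp [wsum]⟩
      · simp only [List.foldl_cons, List.count_cons]
        rw [if_neg (by simp [hc]), ih z (a + z)]
        simp only [Prod.mk.injEq]
        refine ⟨by simp; exact hc, ?_⟩
        simp only [split1, if_neg hc, List.nil_append]
        rw [wsum_split1_pref r [c] z]
        simp only [List.length_cons, List.length_nil]
        push_cast
        ring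

lemma loopA_eq (ps : List (List Char)) :
    (PySem.List.pyRange 0 (ps.length : Int) 1).foldl
      (fun ans i => ans + i * ((PySem.List.pyGetD ps i []).length : Int)) 0
    = wsum 0 ps := by
  rw [PySem.List.pyRange_zero_natCast, List.foldl_map]
  rw [PySem.List.foldl_congr_mem (List.range ps.length) _
    (fun ans (i : Nat) => ans + ((0 + i : Nat) : Int) * ((ps.getD i []).length : Int)) 0 ?_]
  · rw [foldl_range_wsum ps 0 0]; exact zero_add _
  · intro a x hx
    rw [List.mem_range] at hx
    rw [PySem.List.pyGetD_natCast ps x []]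
    simp

-- ===== VERDICT (by name: the statement is the Claim_ definition above) =====
theorem solution_spec : Claim_equal_solution := by
  intro A _
  show solution A = solution_alt A
  unfold solution solution_alt
  simp only []
  rw [loopA_eq, splitOn_eq_split1, foldl_counter (pvPrep A) 0 0]
  simp
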